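-- pv_equiv track=rewrite | github.com/hobolee/ENV_time_interpolation | lib.py | generate_val_data
-- ===== SOURCE A (Python) =====
-- def generate_val_data(t_data, interval):
--     """
--     To find continuous data clip which does not contain any -99999
--     :param t_data: data
--     :param interval: int, length of validate_data
--     :return: start_t, end_t, index of the clip
--     """
--     interval = interval * 2  # To aviod the clip start after -99999
--     start_t = []
--     end_t = []
--     count = 0
--     state = 'invalid'
--     flag = True
--     for i, d in enumerate(t_data):
--         if d != -99999:
--             if state == 'invalid':
--                 state = 'valid'
--             elif count >= interval and flag is True:
--                 start_t.append(i - interval)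
--                 flag = False
--             count += 1
--         else:
--             if not flag:
--                 flag = True
--                 end_t.append(i - 1)
--             count = 0
--     if len(start_t) > len(end_t) and flag is False:
--         end_t.append(len(t_data) - 1)
--     return start_t, end_t
-- ===== SOURCE B (Python) =====
-- def generate_val_data(t_data, interval):
--     # Two-phase: collect maximal sentinel-free runs, then keep those longer than 2*interval.
--     threshold = interval * 2
--     runs = []
--     start = None
--     for i, d in enumerate(t_data):
--         if d == -99999:
--             if start is not None:
--                 runs.append((start, i - 1))
--                 start = None
--         else:
--             if start is None:
--                 start = i
--     if start is not None:
--         runs.append((start, len(t_data) - 1))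
--     kept = [(s, e) for (s, e) in runs if e - s + 1 > threshold]
--     return [s for s, _ in kept], [e for _, e in kept]
-- ===== Notes on version B (the rewrite author's own statement) =====
-- stated objective: simpler
-- what changed: Replaced A's single-pass count/state/flag state machine (with its end-of-list patch-up) by a two-phase decomposition: collect the maximal sentinel-free runs, then keep the runs longer than 2*interval.
-- outside the precondition, e.g. on generate_val_data([1, 2, 3], 0): A returns ([1], [2]), B returns ([0], [2]); on generate_val_data([1, 2, 3], -1): A returns ([3], [2]), B returns ([0], [2])
import Mathlib
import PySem

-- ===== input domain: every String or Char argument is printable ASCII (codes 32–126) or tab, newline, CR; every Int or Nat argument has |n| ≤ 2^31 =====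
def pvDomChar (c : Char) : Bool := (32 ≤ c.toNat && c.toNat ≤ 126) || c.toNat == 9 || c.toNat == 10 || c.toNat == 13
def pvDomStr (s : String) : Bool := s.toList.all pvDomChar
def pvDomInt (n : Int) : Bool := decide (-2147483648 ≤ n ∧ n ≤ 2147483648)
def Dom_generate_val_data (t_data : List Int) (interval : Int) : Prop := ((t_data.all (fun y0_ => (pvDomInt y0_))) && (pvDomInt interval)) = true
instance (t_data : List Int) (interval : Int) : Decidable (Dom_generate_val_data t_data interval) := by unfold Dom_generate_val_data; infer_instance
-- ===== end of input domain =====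

-- B replaces A's count/state/flag state machine with a two-phase "collect maximal
-- runs, then keep runs longer than 2*interval" decomposition (objective: simpler).

-- ===== PORT A =====
-- one loop iteration of A: state = (start_t, end_t, count, state, flag)
def pvStepA (interval : Int) (acc : List Int × List Int × Int × String × Bool)
    (p : Int × Int) : List Int × List Int × Int × String × Bool :=
  if p.2 ≠ -99999 then
    if acc.2.2.2.1 = "invalid" then
      (acc.1, acc.2.1, acc.2.2.1 + 1, "valid", acc.2.2.2.2)
    else if acc.2.2.1 ≥ interval ∧ acc.2.2.2.2 = true then
      (acc.1 ++ [p.1 - interval], acc.2.1, acc.2.2.1 + 1, acc.2.2.2.1, false)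
    else
      (acc.1, acc.2.1, acc.2.2.1 + 1, acc.2.2.2.1, acc.2.2.2.2)
  else
    if acc.2.2.2.2 = false then
      (acc.1, acc.2.1 ++ [p.1 - 1], 0, acc.2.2.2.1, true)
    else
      (acc.1, acc.2.1, 0, acc.2.2.2.1, acc.2.2.2.2)

def generate_val_data (t_data : List Int) (interval : Int) : List Int × List Int :=
  let interval := interval * 2
  let s := (PySem.List.enumerate t_data 0).foldl (pvStepA interval) ([], [], 0, "invalid", true)
  if s.1.length > s.2.1.length ∧ s.2.2.2.2 = false then
    (s.1, s.2.1 ++ [(t_data.length : Int) - 1])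
  else
    (s.1, s.2.1)

-- ===== PORT B =====
-- one loop iteration of B: state = (closed runs so far, start of the open run if any)
def pvStepB (acc : List (Int × Int) × Option Int) (p : Int × Int) : List (Int × Int) × Option Int :=
  if p.2 = -99999 then
    match acc.2 with
    | some b => (acc.1 ++ [(b, p.1 - 1)], none)
    | none => acc
  else
    match acc.2 with
    | none => (acc.1, some p.1)
    | some _ => acc

-- the run-length test of B's comprehension
def pvKeep (threshold : Int) (r : Int × Int) : Bool := r.2 - r.1 + 1 > threshold

def generate_val_data_alt (t_data : List Int) (interval : Int) : List Int × List Int :=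
  let threshold := interval * 2
  let st := (PySem.List.enumerate t_data 0).foldl pvStepB ([], none)
  let runs := match st.2 with
    | some b => st.1 ++ [(b, (t_data.length : Int) - 1)]
    | none => st.1
  let kept := runs.filter (pvKeep threshold)
  (kept.map (·.1), kept.map (·.2))

-- ===== PRECONDITION & SPEC =====
-- Pre_ excludes non-positive interval, outside the natural domain of a length
-- parameter; there A's (return-value) start indices are shifted/out-of-range
-- artefacts of its count/flag bookkeeping on the first run.
def Pre_generate_val_data (t_data : List Int) (interval : Int) : Prop := 1 ≤ interval
instance (t_data : List Int) (interval : Int) : Decidable (Pre_generate_val_data t_data interval) := by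
  unfold Pre_generate_val_data; infer_instance

def pvWitness_generate_val_data : List Int × Int := ([1, -99999, 5, 6, 7], 1)

def Spec_generate_val_data (t_data : List Int) (interval : Int) (out : List Int × List Int) : Prop := out = generate_val_data_alt t_data interval
instance (t_data : List Int) (interval : Int) (out : List Int × List Int) : Decidable (Spec_generate_val_data t_data interval out) := by unfold Spec_generate_val_data; infer_instance

-- ===== CLAIM (what is proved, stated in full; the proofs are below) =====
def Claim_equal_generate_val_data : Prop := ∀ (t_data : List Int) (interval : Int), Dom_generate_val_data t_data interval → Pre_generate_val_data t_data interval → Spec_generate_val_data t_data interval (generate_val_data t_data interval)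

-- ===== LEMMAS AND PROOFS =====

-- A's loop state as a function of B's loop state (i = next index, st = A's 'state' string)
def pvAbs (T i : Int) (acc : List (Int × Int)) (cur : Option Int) (st : String) :
    List Int × List Int × Int × String × Bool :=
  ((acc.filter (pvKeep T)).map (·.1) ++
     (match cur with | some b => if i - b > T then [b] else [] | none => []),
   (acc.filter (pvKeep T)).map (·.2),
   (match cur with | some b => i - b | none => 0),
   st,
   (match cur with | some b => !decide (i - b > T) | none => true))

theorem pvFold_eq (T : Int) (hT : 2 ≤ T) (l : List Int) :
    ∀ (i : Int) (acc : List (Int × Int)) (cur : Option Int) (st : String),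
    (st = "invalid" → cur = none) →
    ∃ st',
      (PySem.List.enumerate l i).foldl (pvStepA T) (pvAbs T i acc cur st) =
        pvAbs T (i + l.length) ((PySem.List.enumerate l i).foldl pvStepB (acc, cur)).1
          ((PySem.List.enumerate l i).foldl pvStepB (acc, cur)).2 st' ∧
      (st' = "invalid" → ((PySem.List.enumerate l i).foldl pvStepB (acc, cur)).2 = none) := by
  induction l with
  | nil => intro i acc cur st hst; exact ⟨st, by simp [PySem.List.enumerate_nil], hst⟩
  | cons d l ih =>
    intro i acc cur st hst
    rw [PySem.List.enumerate_cons]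
    simp only [List.foldl_cons]
    have harith : (i : Int) + (↑(d :: l).length) = (i + 1) + l.length := by
      simp; ring
    rw [harith]
    by_cases hd : d = -99999
    · -- sentinel
      cases cur with
      | none =>
        have h1 : pvStepA T (pvAbs T i acc none st) (i, d) = pvAbs T (i+1) acc none st := by
          simp [pvStepA, pvAbs, hd]
        have h2 : pvStepB (acc, none) (i, d) = (acc, none) := by simp [pvStepB, hd]
        rw [h1, h2]
        exact ih (i+1) acc none st hst
      | some b =>
        have h2 : pvStepB (acc, some b) (i, d) = (acc ++ [(b, i-1)], none) := by
          simp [pvStepB, hd]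
        have h1 : pvStepA T (pvAbs T i acc (some b) st) (i, d) =
            pvAbs T (i+1) (acc ++ [(b, i-1)]) none st := by
          by_cases hq : i - b > T
          · have hk : pvKeep T (b, i - 1) = true := by
              simp only [pvKeep, decide_eq_true_eq]; omega
            simp [pvStepA, pvAbs, hd, hq, hk, List.filter_append]
            all_goals (try omega)
            all_goals (split_ifs <;> (try simp_all) <;> (try omega))
          · have hk : pvKeep T (b, i - 1) = false := by
              simp only [pvKeep, decide_eq_false_iff_not]; omega
            simp [pvStepA, pvAbs, hd, hq, hk, List.filter_append]
            all_goals (try omega)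
            all_goals (split_ifs <;> (try simp_all) <;> (try omega))
        rw [h1, h2]
        exact ih (i+1) (acc ++ [(b, i-1)]) none st (fun _ => rfl)
    · -- valid element
      cases cur with
      | none =>
        have h2 : pvStepB (acc, none) (i, d) = (acc, some i) := by simp [pvStepB, hd]
        have hp : ¬(i + 1 - i > T) := by omega
        rw [h2]
        by_cases hs : st = "invalid"
        · have h1 : pvStepA T (pvAbs T i acc none st) (i, d) =
              pvAbs T (i+1) acc (some i) "valid" := by
            simp [pvStepA, pvAbs, hd, hs, hp]
            all_goals (try omega)
            all_goals (split_ifs <;> (try simp_all) <;> (try omega))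
          rw [h1]
          exact ih (i+1) acc (some i) "valid" (by intro h; simp at h)
        · have h1 : pvStepA T (pvAbs T i acc none st) (i, d) =
              pvAbs T (i+1) acc (some i) st := by
            simp [pvStepA, pvAbs, hd, hs, hp, hT]
            all_goals (try omega)
            all_goals (split_ifs <;> (try simp_all) <;> (try omega))
          rw [h1]
          exact ih (i+1) acc (some i) st (fun h => absurd h hs)
      | some b =>
        have hs : st ≠ "invalid" := fun h => by simpa using hst h
        have h2 : pvStepB (acc, some b) (i, d) = (acc, some b) := by simp [pvStepB, hd]
        have h1 : pvStepA T (pvAbs T i acc (some b) st) (i, d) =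
            pvAbs T (i+1) acc (some b) st := by
          by_cases hgt : i - b > T
          · have hp : i + 1 - b > T := by omega
            simp [pvStepA, pvAbs, hd, hs, hgt, hp]
            all_goals (try omega)
            all_goals (split_ifs <;> (try simp_all) <;> (try omega))
          · by_cases hge : i - b ≥ T
            · have hp : i + 1 - b > T := by omega
              simp [pvStepA, pvAbs, hd, hs, hgt, hge, hp]
              all_goals (try omega)
              all_goals (split_ifs <;> (try simp_all) <;> (try omega))
            · have hp : ¬(i + 1 - b > T) := by omega
              have hg : ¬(i - b ≥ T) := hge
              simp [pvStepA, pvAbs, hd, hs, hgt, hg, hp]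
              all_goals (try omega)
              all_goals (split_ifs <;> (try simp_all) <;> (try omega))
        rw [h1, h2]
        exact ih (i+1) acc (some b) st (fun h => absurd h hs)

-- ===== VERDICT (by name: the statement is the Claim_ definition above) =====
theorem generate_val_data_spec : Claim_equal_generate_val_data := by
  intro t_data interval _ hpre
  unfold Spec_generate_val_data generate_val_data generate_val_data_alt
  have hT : 2 ≤ interval * 2 := by unfold Pre_generate_val_data at hpre; omega
  have h0 : (([], [], 0, "invalid", true) : List Int × List Int × Int × String × Bool) =
      pvAbs (interval * 2) 0 [] none "invalid" := by simp [pvAbs]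
  obtain ⟨st', hmain, -⟩ := pvFold_eq (interval * 2) hT t_data 0 [] none "invalid" (fun _ => rfl)
  simp only [h0, hmain]
  set r := (PySem.List.enumerate t_data 0).foldl pvStepB ([], none) with hr
  cases hcur : r.2 with
  | none =>
    simp [pvAbs]
  | some b =>
    by_cases hq : (0 : Int) + t_data.length - b > interval * 2
    · have hk : pvKeep (interval * 2) (b, (t_data.length : Int) - 1) = true := by
        simp only [pvKeep, decide_eq_true_eq]; omega
      simp [pvAbs, hq, List.filter_append, hk]
      all_goals (try omega)
      all_goals (split_ifs <;> (try simp_all) <;> (try omega))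
    · have hk : pvKeep (interval * 2) (b, (t_data.length : Int) - 1) = false := by
        simp only [pvKeep, decide_eq_false_iff_not]; omega
      simp [pvAbs, hq, List.filter_append, hk]
      all_goals (try omega)
      all_goals (split_ifs <;> (try simp_all) <;> (try omega))
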